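-- pv_equiv track=rewrite | github.com/miroegres/AoC2025 | d04/p2.py | overlay_R
-- ===== SOURCE A (Python) =====
-- def overlay_R(grid, coords):
--     """Return lines marking accessible '@' with 'R' (pre-removal)."""
--     coords_set = set(coords)
--     out = []
--     for r, row in enumerate(grid):
--         line = []
--         for c, ch in enumerate(row):
--             if ch == '@' and (r, c) in coords_set:
--                 line.append('R')
--             else:
--                 line.append(ch)
--         out.append(''.join(line))
--     return out
-- ===== SOURCE B (Python) =====
-- def overlay_R(grid, coords):
--     """Return lines marking accessible '@' with 'R' (pre-removal)."""
--     out = [list(row) for row in grid]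
--     for r, c in coords:
--         if 0 <= r < len(out) and 0 <= c < len(out[r]) and out[r][c] == '@':
--             out[r][c] = 'R'
--     return [''.join(row) for row in out]
-- ===== Notes on version B (the rewrite author's own statement) =====
-- stated objective: simpler
-- what changed: Instead of scanning every grid cell and testing membership in a set of coords, B copies the grid into mutable rows and scatters a write onto each in-bounds coordinate whose cell is '@'.
import Mathlib
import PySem

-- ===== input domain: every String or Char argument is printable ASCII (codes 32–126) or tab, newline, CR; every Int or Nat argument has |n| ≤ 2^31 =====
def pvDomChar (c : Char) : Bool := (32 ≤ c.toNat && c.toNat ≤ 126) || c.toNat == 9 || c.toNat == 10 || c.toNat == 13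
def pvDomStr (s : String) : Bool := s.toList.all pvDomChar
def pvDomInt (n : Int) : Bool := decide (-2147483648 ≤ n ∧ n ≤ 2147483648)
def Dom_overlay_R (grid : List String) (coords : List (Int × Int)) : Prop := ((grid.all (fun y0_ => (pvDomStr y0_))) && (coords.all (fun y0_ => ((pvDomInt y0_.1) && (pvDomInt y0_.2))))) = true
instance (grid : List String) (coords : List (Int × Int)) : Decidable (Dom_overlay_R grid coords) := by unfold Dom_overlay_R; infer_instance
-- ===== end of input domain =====

-- B replaces A's full-grid scan with set-membership tests by a scatter of guarded
-- writes onto a mutable copy, one write attempt per coordinate (objective: simpler).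

-- ===== PORT A =====
def overlay_R (grid : List String) (coords : List (Int × Int)) : List String :=
  let coords_set := PySem.Set.ofList coords
  (PySem.List.enumerate grid).map (fun rr =>
    String.ofList ((PySem.List.enumerate rr.2.toList).map (fun cc =>
      if cc.2 == '@' && PySem.Set.contains coords_set (rr.1, cc.1) then 'R' else cc.2)))

-- ===== PORT B =====
-- one iteration of B's loop body: guarded in-place write at coordinate rc
def markCell (out : List (List Char)) (rc : Int × Int) : List (List Char) :=
  if 0 ≤ rc.1 ∧ rc.1 < out.length ∧ 0 ≤ rc.2 ∧ rc.2 < (out.getD rc.1.toNat []).length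
      ∧ (out.getD rc.1.toNat []).getD rc.2.toNat ' ' = '@'
  then out.set rc.1.toNat ((out.getD rc.1.toNat []).set rc.2.toNat 'R')
  else out

def overlay_R_alt (grid : List String) (coords : List (Int × Int)) : List String :=
  (coords.foldl markCell (grid.map String.toList)).map String.ofList

-- ===== PRECONDITION & SPEC =====
def Spec_overlay_R (grid : List String) (coords : List (Int × Int)) (out : List String) : Prop := out = overlay_R_alt grid coords
instance (grid : List String) (coords : List (Int × Int)) (out : List String) : Decidable (Spec_overlay_R grid coords out) := by unfold Spec_overlay_R; infer_instance

-- ===== CLAIM (what is proved, stated in full; the proofs are below) =====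
def Claim_equal_overlay_R : Prop := ∀ (grid : List String) (coords : List (Int × Int)), Dom_overlay_R grid coords → Spec_overlay_R grid coords (overlay_R grid coords)

-- ===== LEMMAS AND PROOFS =====

theorem mark_length (out : List (List Char)) (rc : Int × Int) :
    (markCell out rc).length = out.length := by
  unfold markCell; split <;> simp

theorem mark_row_len (out : List (List Char)) (rc : Int × Int) (i : Nat) :
    ((markCell out rc).getD i []).length = (out.getD i []).length := by
  unfold markCell; split
  case isTrue hc =>
    simp only [List.getD, List.getElem?_set]
    by_cases h : rc.1.toNat = i
    · subst h
      have hlt : rc.1.toNat < out.length := by omega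
      simp [hlt]
    · simp [h]
  case isFalse hc => rfl

theorem mark_getD (out : List (List Char)) (rc : Int × Int) (i j : Nat) :
    ((markCell out rc).getD i []).getD j ' ' =
      if ((i : Int), (j : Int)) = rc ∧ (out.getD i []).getD j ' ' = '@'
          ∧ i < out.length ∧ j < (out.getD i []).length
      then 'R' else (out.getD i []).getD j ' ' := by
  obtain ⟨a, b⟩ := rc
  unfold markCell
  dsimp only
  split
  case isTrue hc =>
    obtain ⟨h0r, hr, h0c, hcb, hch⟩ := hc
    by_cases hi : a.toNat = i
    · subst hi
      have hlt : a.toNat < out.length := by omega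
      by_cases hj : b.toNat = j
      · subst hj
        have hjlt : b.toNat < (out.getD a.toNat []).length := by omega
        have hpair : ((a.toNat : Int), (b.toNat : Int)) = (a, b) := by
          simp [Prod.mk.injEq]; omega
        have hjlt' : b.toNat < out[a.toNat].length := by
          rwa [List.getD_eq_getElem out [] hlt] at hjlt
        rw [if_pos ⟨hpair, hch, hlt, hjlt⟩]
        simp [List.getD, hlt, hjlt']
      · have hne : ¬(((a.toNat : Int), (j : Int)) = (a, b)) := by
          simp [Prod.mk.injEq]; omega
        rw [if_neg (fun h => hne h.1)]
        simp [List.getD, hlt, hj]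
    · have hne : ¬(((i : Int), (j : Int)) = (a, b)) := by
        simp [Prod.mk.injEq]; omega
      rw [if_neg (fun h => hne h.1)]
      simp [List.getD, hi]
  case isFalse hc =>
    rw [if_neg]
    rintro ⟨hij, hch2, hib, hjb⟩
    apply hc
    have h1 : (i : Int) = a := congrArg Prod.fst hij
    have h2 : (j : Int) = b := congrArg Prod.snd hij
    have e1 : a.toNat = i := by omega
    have e2 : b.toNat = j := by omega
    rw [e1, e2]
    exact ⟨by omega, by omega, by omega, by omega, hch2⟩

theorem fold_length (coords : List (Int × Int)) (out : List (List Char)) :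
    (coords.foldl markCell out).length = out.length := by
  induction coords generalizing out with
  | nil => rfl
  | cons rc rest ih => rw [List.foldl_cons, ih, mark_length]

theorem fold_row_len (coords : List (Int × Int)) (out : List (List Char)) (i : Nat) :
    ((coords.foldl markCell out).getD i []).length = (out.getD i []).length := by
  induction coords generalizing out with
  | nil => rfl
  | cons rc rest ih => rw [List.foldl_cons, ih, mark_row_len]

theorem fold_getD (coords : List (Int × Int)) (out : List (List Char)) (i j : Nat) :
    ((coords.foldl markCell out).getD i []).getD j ' ' =
      if ((i : Int), (j : Int)) ∈ coords ∧ (out.getD i []).getD j ' ' = '@'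
          ∧ i < out.length ∧ j < (out.getD i []).length
      then 'R' else (out.getD i []).getD j ' ' := by
  induction coords generalizing out with
  | nil => simp
  | cons rc rest ih =>
    rw [List.foldl_cons, ih, mark_length, mark_row_len, mark_getD]
    have hRA : ('R' : Char) ≠ '@' := by decide
    set L := out.length with hL
    set row := out.getD i [] with hrowdef
    set cell := row.getD j ' ' with hcelldef
    by_cases hrc : ((i : Int), (j : Int)) = rc <;>
      by_cases hat : cell = '@' <;>
        by_cases hib : i < L <;>
          by_cases hjb : j < row.length <;>
            simp [hrc, hat, hib, hjb, hRA, List.mem_cons]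

-- ===== VERDICT (by name: the statement is the Claim_ definition above) =====
theorem getD_eq_get (l : List (List Char)) (i : Nat) (h : i < l.length) :
    l.getD i [] = l[i] := List.getD_eq_getElem l [] h

theorem overlay_R_spec : Claim_equal_overlay_R := by
  intro grid coords _
  unfold Spec_overlay_R overlay_R overlay_R_alt
  apply List.ext_getElem
  · simp [fold_length]
  · intro i h1 h2
    have hig : i < grid.length := by simpa [fold_length] using h2
    simp only [List.getElem_map, PySem.List.getElem_enumerate]
    have hrow : (coords.foldl markCell (grid.map String.toList)).getD i []
        = (coords.foldl markCell (grid.map String.toList))[i]'(by simpa [fold_length] using hig) := by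
      apply getD_eq_get
    have hbase : (grid.map String.toList).getD i [] = grid[i].toList := by
      rw [getD_eq_get _ _ (by simpa using hig)]; simp
    congr 1
    apply List.ext_getElem
    · rw [← hrow, fold_row_len, hbase]; simp
    · intro j hj1 hj2
      have hjc : j < grid[i].toList.length := by simpa using hj1
      simp only [List.getElem_map, PySem.List.getElem_enumerate, zero_add]
      rw [show ((coords.foldl markCell (grid.map String.toList))[i]'_)[j]'hj2
            = ((coords.foldl markCell (grid.map String.toList)).getD i []).getD j ' ' by
          rw [hrow]; exact (List.getD_eq_getElem _ ' ' _).symm]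
      rw [fold_getD, hbase]
      have hb1 : i < (List.map String.toList grid).length := by simpa using hig
      rw [List.getD_eq_getElem _ ' ' hjc]
      simp only [Bool.and_eq_true, beq_iff_eq, PySem.Set.contains_iff, PySem.Set.mem_ofList]
      split_ifs with h1 h2 <;> first | rfl | (exfalso; tauto)
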